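-- pv_equiv track=rewrite | github.com/shalgrim/advent-of-code | python/y2023/day20_1.py | calc_final
-- ===== SOURCE A (Python) =====
-- def calc_final(i, state, seen_states, sent_counts):
--     original_i = seen_states[state]
--
--     original_lo = 0
--     original_hi = 0
--     for j in range(original_i):
--         original_lo += sent_counts[j][0]
--         original_hi += sent_counts[j][1]
--
--     repeatable_lo = 0
--     repeatable_hi = 0
--     for j in range(original_i, i):
--         repeatable_lo += sent_counts[j][0]
--         repeatable_hi += sent_counts[j][1]
--
--     num_repeats = (1000 - original_i) // (i - original_i)
--     repeatable_lo *= num_repeats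
--     repeatable_hi *= num_repeats
--
--     # calc remainder
--     remainder = 1000 - (original_i + (i - original_i) * num_repeats)
--     remainder_lo = sum(r[0] for r in sent_counts[:remainder])
--     remainder_hi = sum(r[1] for r in sent_counts[:remainder])
--
--     return (original_lo + repeatable_lo + remainder_lo), (
--         original_hi + repeatable_hi + remainder_hi
--     )
-- ===== SOURCE B (Python) =====
-- def calc_final(i, state, seen_states, sent_counts):
--     # Tally each entry's multiplicity in a weight vector (the cycle entries
--     # count num_repeats times), then take a single weighted sum per component.
--     original_i = seen_states[state]
--     num_repeats, remainder = divmod(1000 - original_i, i - original_i)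
--
--     weights = [0] * len(sent_counts)
--     for j in range(original_i):
--         weights[j] += 1
--     for j in range(original_i, i):
--         weights[j] += num_repeats
--     for j, _ in enumerate(sent_counts[:remainder]):
--         weights[j] += 1
--
--     lo = sum(r[0] * w for r, w in zip(sent_counts, weights))
--     hi = sum(r[1] * w for r, w in zip(sent_counts, weights))
--     return lo, hi
-- ===== Notes on version B (the rewrite author's own statement) =====
-- stated objective: alternative
-- what changed: A accumulates three separate running totals (two index loops and a slice-sum) and combines them arithmetically; B tallies each entry's multiplicity into one weight vector and computes a single weighted sum per component; Pre_ excludes only inputs where A raises (missing key, zero cycle length, index out of range).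
import Mathlib
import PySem

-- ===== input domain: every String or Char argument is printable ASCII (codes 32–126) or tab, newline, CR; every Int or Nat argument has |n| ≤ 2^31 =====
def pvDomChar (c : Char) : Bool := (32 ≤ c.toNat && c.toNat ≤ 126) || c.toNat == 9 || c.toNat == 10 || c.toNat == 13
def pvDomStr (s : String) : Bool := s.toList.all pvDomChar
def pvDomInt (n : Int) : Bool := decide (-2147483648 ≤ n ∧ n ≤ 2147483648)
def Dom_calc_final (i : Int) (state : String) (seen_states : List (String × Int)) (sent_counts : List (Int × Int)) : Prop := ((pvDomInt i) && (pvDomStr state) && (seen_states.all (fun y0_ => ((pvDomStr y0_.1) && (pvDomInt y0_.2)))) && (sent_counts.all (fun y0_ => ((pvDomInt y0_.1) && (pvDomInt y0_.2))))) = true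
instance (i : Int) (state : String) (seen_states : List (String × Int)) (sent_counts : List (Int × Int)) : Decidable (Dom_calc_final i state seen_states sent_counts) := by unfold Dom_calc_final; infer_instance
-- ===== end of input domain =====

-- B replaces A's three separate running totals by one weight vector (how often each
-- entry counts) and a single weighted sum per component; objective: alternative
-- decomposition (same asymptotic cost).

-- ===== PORT A =====
def calc_final (i : Int) (state : String) (seen_states : List (String × Int)) (sent_counts : List (Int × Int)) : Int × Int :=
  let original_i := ((PySem.Dict.mk seen_states).get? state).getD 0
  let o := (PySem.List.pyRange 0 original_i).foldl
      (fun (p : Int × Int) j =>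
        (p.1 + (PySem.List.pyGetD sent_counts j (0, 0)).1,
         p.2 + (PySem.List.pyGetD sent_counts j (0, 0)).2)) (0, 0)
  let rp := (PySem.List.pyRange original_i i).foldl
      (fun (p : Int × Int) j =>
        (p.1 + (PySem.List.pyGetD sent_counts j (0, 0)).1,
         p.2 + (PySem.List.pyGetD sent_counts j (0, 0)).2)) (0, 0)
  let num_repeats := PySem.Int.floordiv (1000 - original_i) (i - original_i)
  let repeatable_lo := rp.1 * num_repeats
  let repeatable_hi := rp.2 * num_repeats
  let remainder := 1000 - (original_i + (i - original_i) * num_repeats)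
  let remainder_lo := ((PySem.List.slice sent_counts none (some remainder)).map (fun r => r.1)).sum
  let remainder_hi := ((PySem.List.slice sent_counts none (some remainder)).map (fun r => r.2)).sum
  (o.1 + repeatable_lo + remainder_lo, o.2 + repeatable_hi + remainder_hi)

-- ===== PORT B =====
-- 'weights[j] += c' is ported with the total primitives pySetD/pyGetD (exact under
-- Pre_'s in-range condition, like every index Python A itself performs).
def calc_final_alt (i : Int) (state : String) (seen_states : List (String × Int)) (sent_counts : List (Int × Int)) : Int × Int :=
  let original_i := ((PySem.Dict.mk seen_states).get? state).getD 0
  let num_repeats := PySem.Int.floordiv (1000 - original_i) (i - original_i)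
  let remainder := PySem.Int.mod (1000 - original_i) (i - original_i)
  let w0 := List.replicate sent_counts.length (0 : Int)
  let w1 := (PySem.List.pyRange 0 original_i).foldl
      (fun ws j => PySem.List.pySetD ws j (PySem.List.pyGetD ws j 0 + 1)) w0
  let w2 := (PySem.List.pyRange original_i i).foldl
      (fun ws j => PySem.List.pySetD ws j (PySem.List.pyGetD ws j 0 + num_repeats)) w1
  let w3 := (PySem.List.enumerate (PySem.List.slice sent_counts none (some remainder))).foldl
      (fun ws p => PySem.List.pySetD ws p.1 (PySem.List.pyGetD ws p.1 0 + 1)) w2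
  let lo := ((sent_counts.zip w3).map (fun rw => rw.1.1 * rw.2)).sum
  let hi := ((sent_counts.zip w3).map (fun rw => rw.1.2 * rw.2)).sum
  (lo, hi)

-- ===== PRECONDITION & SPEC =====
-- Pre_ is exactly A's raise-free domain: the state is a recorded key (else KeyError), its index differs
-- from i (else ZeroDivisionError), and both index loops stay within Python's index range (else IndexError).
def Pre_calc_final (i : Int) (state : String) (seen_states : List (String × Int)) (sent_counts : List (Int × Int)) : Prop :=
  (((PySem.Dict.mk seen_states).get? state).any
    (fun oi => decide (oi ≠ i ∧ oi ≤ (sent_counts.length : Int) ∧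
      (oi < i → -(sent_counts.length : Int) ≤ oi ∧ i ≤ (sent_counts.length : Int))))) = true
instance (i : Int) (state : String) (seen_states : List (String × Int)) (sent_counts : List (Int × Int)) : Decidable (Pre_calc_final i state seen_states sent_counts) := by unfold Pre_calc_final; infer_instance

def pvWitness_calc_final : Int × String × (List (String × Int)) × (List (Int × Int)) :=
  (1, "s", [("s", 0)], [(2, 3)])

def Spec_calc_final (i : Int) (state : String) (seen_states : List (String × Int)) (sent_counts : List (Int × Int)) (out : Int × Int) : Prop := out = calc_final_alt i state seen_states sent_counts
instance (i : Int) (state : String) (seen_states : List (String × Int)) (sent_counts : List (Int × Int)) (out : Int × Int) : Decidable (Spec_calc_final i state seen_states sent_counts out) := by unfold Spec_calc_final; infer_instance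

-- ===== CLAIM (what is proved, stated in full; the proofs are below) =====
def Claim_equal_calc_final : Prop := ∀ (i : Int) (state : String) (seen_states : List (String × Int)) (sent_counts : List (Int × Int)), Dom_calc_final i state seen_states sent_counts → Pre_calc_final i state seen_states sent_counts → Spec_calc_final i state seen_states sent_counts (calc_final i state seen_states sent_counts)

-- ===== LEMMAS AND PROOFS =====

-- the weighted sum B computes from a weight vector
def pv_zsum (f : Int × Int → Int) (sc : List (Int × Int)) (ws : List Int) : Int :=
  ((sc.zip ws).map (fun rw => f rw.1 * rw.2)).sum

-- the value A reads at Python index j (with pyGetD's default, as both ports do)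
def pv_g (f : Int × Int → Int) (sc : List (Int × Int)) (j : Int) : Int :=
  f (PySem.List.pyGetD sc j (0, 0))

lemma pv_zsum_replicate (f : Int × Int → Int) (sc : List (Int × Int)) :
    pv_zsum f sc (List.replicate sc.length 0) = 0 := by
  induction sc with
  | nil => simp [pv_zsum]
  | cons r rest ih => simpa [pv_zsum, List.replicate_succ] using ih

-- bumping one physical slot bumps the weighted sum by that entry's value
lemma pv_zsum_set (f : Int × Int → Int) (sc : List (Int × Int)) (ws : List Int) (p : Nat) (c : Int)
    (hlen : ws.length = sc.length) (hp : p < sc.length) :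
    pv_zsum f sc (ws.set p (ws.getD p 0 + c)) = pv_zsum f sc ws + f (sc[p]'hp) * c := by
  induction sc generalizing ws p with
  | nil => simp at hp
  | cons r rest ih =>
      cases ws with
      | nil => simp at hlen
      | cons w ws' =>
          cases p with
          | zero => simp [pv_zsum]; ring
          | succ p' =>
              have hlen' : ws'.length = rest.length := by simpa using hlen
              have hp' : p' < rest.length := by simpa using hp
              have := ih ws' p' hlen' hp'
              simp only [pv_zsum, List.zip_cons_cons, List.map_cons, List.sum_cons,
                List.set_cons_succ, List.getD_cons_succ, List.getElem_cons_succ] at this ⊢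
              omega

-- Python's 'weights[j] += c' (in range) bumps the weighted sum by the entry at Python index j
lemma pv_zsum_upd (f : Int × Int → Int) (sc : List (Int × Int)) (ws : List Int) (j c : Int)
    (hlen : ws.length = sc.length) (h1 : -(sc.length : Int) ≤ j) (h2 : j < (sc.length : Int)) :
    pv_zsum f sc (PySem.List.pySetD ws j (PySem.List.pyGetD ws j 0 + c))
      = pv_zsum f sc ws + pv_g f sc j * c := by
  obtain ⟨p, hp, hpn⟩ : ∃ p, PySem.List.pyIdx? sc.length j = some p ∧ p < sc.length := by
    unfold PySem.List.pyIdx?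
    by_cases ha : 0 ≤ j
    · refine ⟨j.toNat, ?_, by omega⟩
      rw [if_pos ha, if_pos h2]
    · refine ⟨sc.length - (-j).toNat, ?_, by omega⟩
      rw [if_neg ha, if_pos h1]
  have hget : PySem.List.pyGetD ws j 0 = ws.getD p 0 := by
    simp [PySem.List.pyGetD, PySem.List.pyGet?, hlen, hp, List.getD_eq_getElem?_getD]
  have hset : PySem.List.pySetD ws j (PySem.List.pyGetD ws j 0 + c)
      = ws.set p (ws.getD p 0 + c) := by
    rw [hget]
    simp [PySem.List.pySetD, PySem.List.pySet?, hlen, hp]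
  have hg : pv_g f sc j = f (sc[p]'hpn) := by
    simp [pv_g, PySem.List.pyGetD, PySem.List.pyGet?, hp, List.getElem?_eq_getElem hpn]
  rw [hset, hg, pv_zsum_set f sc ws p c hlen hpn]

lemma pv_length_upd (ws : List Int) (j v : Int) :
    (PySem.List.pySetD ws j v).length = ws.length := by
  unfold PySem.List.pySetD PySem.List.pySet?
  cases h : PySem.List.pyIdx? ws.length j <;> simp [h]

-- folding the bump over a list of in-range indices adds c times the indexed sum
lemma pv_zsum_fold (f : Int × Int → Int) (sc : List (Int × Int)) (c : Int) (l : List Int) :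
    ∀ (ws : List Int), ws.length = sc.length →
    (∀ j ∈ l, -(sc.length : Int) ≤ j ∧ j < (sc.length : Int)) →
    pv_zsum f sc (l.foldl (fun ws j => PySem.List.pySetD ws j (PySem.List.pyGetD ws j 0 + c)) ws)
      = pv_zsum f sc ws + c * (l.map (pv_g f sc)).sum := by
  induction l with
  | nil => intro ws _ _; simp
  | cons j l' ih =>
      intro ws hlen hmem
      obtain ⟨hj1, hj2⟩ := hmem j (by simp)
      simp only [List.foldl_cons, List.map_cons, List.sum_cons]
      rw [ih _ (by rw [pv_length_upd]; exact hlen) (fun j hj => hmem j (by simp [hj])),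
        pv_zsum_upd f sc ws j c hlen hj1 hj2]
      ring

-- A's paired accumulation over an index list
lemma pv_foldA (sc : List (Int × Int)) (l : List Int) :
    ∀ (x y : Int),
    l.foldl
      (fun (p : Int × Int) j =>
        (p.1 + (PySem.List.pyGetD sc j (0, 0)).1,
         p.2 + (PySem.List.pyGetD sc j (0, 0)).2)) (x, y)
    = (x + (l.map (pv_g Prod.fst sc)).sum, y + (l.map (pv_g Prod.snd sc)).sum) := by
  induction l with
  | nil => intro x y; simp
  | cons j l' ih =>
      intro x y
      simp only [List.foldl_cons, List.map_cons, List.sum_cons, ih]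
      exact Prod.ext (by simp [pv_g]; ring) (by simp [pv_g]; ring)

-- weight-preserving folds keep the vector's length
lemma pv_length_fold (l : List Int) (g : List Int → Int → Int) :
    ∀ ws : List Int,
    (l.foldl (fun ws j => PySem.List.pySetD ws j (g ws j)) ws).length = ws.length := by
  induction l with
  | nil => intro ws; rfl
  | cons j l' ih => intro ws; rw [List.foldl_cons, ih, pv_length_upd]

-- summing pv_g over the indices of a take-prefix is summing the prefix
lemma pv_take_sum (f : Int × Int → Int) (sc : List (Int × Int)) (m : Nat) :
    ((PySem.List.pyRange 0 ((sc.take m).length : Int)).map (pv_g f sc)).sum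
      = ((sc.take m).map f).sum := by
  congr 1
  apply List.ext_getElem
  · simp [PySem.List.length_pyRange_one]
    omega
  · intro k h1 h2
    have hkm : k < min m sc.length := by simpa using h2
    have hks : k < sc.length := by omega
    simp only [List.getElem_map, PySem.List.getElem_pyRange_one, List.getElem_take, zero_add]
    simp [pv_g, PySem.List.pyGetD, PySem.List.pyGet?, PySem.List.pyIdx?, hks]

-- ===== VERDICT (by name: the statement is the Claim_ definition above) =====
theorem calc_final_spec : Claim_equal_calc_final := by
  intro i state ss sc _hdom hpre
  unfold Pre_calc_final at hpre
  unfold Spec_calc_final calc_final calc_final_alt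
  cases hg : (PySem.Dict.mk ss).get? state with
  | none => rw [hg] at hpre; simp at hpre
  | some oi =>
      rw [hg] at hpre
      simp only [Option.any_some, decide_eq_true_eq] at hpre
      obtain ⟨hne, hoN, himp⟩ := hpre
      simp only [Option.getD_some]
      set q := PySem.Int.floordiv (1000 - oi) (i - oi) with hq
      have hrem : PySem.Int.mod (1000 - oi) (i - oi) = 1000 - (oi + (i - oi) * q) := by
        have h := PySem.Int.floordiv_mul_add_mod (1000 - oi) (i - oi)
        linarith [mul_comm q (i - oi)]
      rw [hrem]
      set rem := 1000 - (oi + (i - oi) * q) with hremdef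
      obtain ⟨mN, hsl⟩ : ∃ m, PySem.List.slice sc none (some rem) = sc.take m := by
        by_cases h : 0 ≤ rem
        · exact ⟨rem.toNat, PySem.List.slice_to sc h⟩
        · refine ⟨sc.length - (-rem).toNat, ?_⟩
          have hk := PySem.List.slice_to_neg_natCast sc (k := (-rem).toNat) (by omega)
          rw [show (-(((-rem).toNat : Nat) : Int)) = rem from by omega] at hk
          exact hk
      rw [hsl, pv_foldA sc (PySem.List.pyRange 0 oi) 0 0,
        pv_foldA sc (PySem.List.pyRange oi i) 0 0]
      have henum : ∀ W : List Int,
          (PySem.List.enumerate (sc.take mN)).foldl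
            (fun ws (p : Int × (Int × Int)) =>
              PySem.List.pySetD ws p.1 (PySem.List.pyGetD ws p.1 0 + 1)) W
          = (PySem.List.pyRange 0 ((sc.take mN).length : Int)).foldl
            (fun ws j => PySem.List.pySetD ws j (PySem.List.pyGetD ws j 0 + 1)) W := by
        intro W
        rw [show (PySem.List.pyRange 0 ((sc.take mN).length : Int))
              = (PySem.List.enumerate (sc.take mN)).map Prod.fst from by
            rw [PySem.List.map_fst_enumerate]; norm_num,
          List.foldl_map]
      rw [henum]
      have hm1 : ∀ j ∈ PySem.List.pyRange 0 oi,
          -(sc.length : Int) ≤ j ∧ j < (sc.length : Int) := by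
        intro j hj
        rw [PySem.List.mem_pyRange_one] at hj
        omega
      have hm2 : ∀ j ∈ PySem.List.pyRange oi i,
          -(sc.length : Int) ≤ j ∧ j < (sc.length : Int) := by
        intro j hj
        rw [PySem.List.mem_pyRange_one] at hj
        have := himp (by omega)
        omega
      have hm3 : ∀ j ∈ PySem.List.pyRange 0 ((sc.take mN).length : Int),
          -(sc.length : Int) ≤ j ∧ j < (sc.length : Int) := by
        intro j hj
        rw [PySem.List.mem_pyRange_one] at hj
        have : (sc.take mN).length ≤ sc.length := by simp
        omega
      have hlen0 : (List.replicate sc.length (0 : Int)).length = sc.length := by simp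
      have hB : ∀ f : Int × Int → Int,
          pv_zsum f sc ((PySem.List.pyRange 0 ((sc.take mN).length : Int)).foldl
            (fun ws j => PySem.List.pySetD ws j (PySem.List.pyGetD ws j 0 + 1))
            ((PySem.List.pyRange oi i).foldl
              (fun ws j => PySem.List.pySetD ws j (PySem.List.pyGetD ws j 0 + q))
              ((PySem.List.pyRange 0 oi).foldl
                (fun ws j => PySem.List.pySetD ws j (PySem.List.pyGetD ws j 0 + 1))
                (List.replicate sc.length 0))))
          = ((PySem.List.pyRange 0 oi).map (pv_g f sc)).sum
            + q * ((PySem.List.pyRange oi i).map (pv_g f sc)).sum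
            + ((sc.take mN).map f).sum := by
        intro f
        rw [pv_zsum_fold f sc 1 _ _ (by rw [pv_length_fold, pv_length_fold]; exact hlen0) hm3,
          pv_zsum_fold f sc q _ _ (by rw [pv_length_fold]; exact hlen0) hm2,
          pv_zsum_fold f sc 1 _ _ hlen0 hm1,
          pv_zsum_replicate, pv_take_sum]
        ring
      have hB1 := hB Prod.fst
      have hB2 := hB Prod.snd
      simp only [pv_zsum] at hB1 hB2
      rw [show (fun (r : Int × Int) => r.1) = Prod.fst from rfl,
        show (fun (r : Int × Int) => r.2) = Prod.snd from rfl,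
        show (fun (rw_ : (Int × Int) × Int) => rw_.1.1 * rw_.2)
          = (fun rw_ : (Int × Int) × Int => Prod.fst rw_.1 * rw_.2) from rfl,
        show (fun (rw_ : (Int × Int) × Int) => rw_.1.2 * rw_.2)
          = (fun rw_ : (Int × Int) × Int => Prod.snd rw_.1 * rw_.2) from rfl]
      refine Prod.ext ?_ ?_
      · dsimp only
        rw [hB1]
        ring
      · dsimp only
        rw [hB2]
        ring
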